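-- pv_equiv track=rewrite | github.com/wprzadka/AdventOfCode | AoE2021/day20/star1.py | correct_boundary
-- ===== SOURCE A (Python) =====
-- def correct_boundary(img: list, value: chr) -> list:
--     size_y = len(img)
--     size_x = len(img[0])
--     for y in range(size_y):
--         img[y][0] = value
--         img[y][size_x - 1] = value
--     for x in range(size_x):
--         img[0][x] = value
--         img[size_y - 1][x] = value
--     return img
-- ===== SOURCE B (Python) =====
-- def correct_boundary(img: list, value: chr) -> list:
--     size_y = len(img)
--     size_x = len(img[0])
--     for y in range(size_y):
--         for x in range(size_x):
--             if y == 0 or y == size_y - 1 or x == 0 or x == size_x - 1: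
--                 img[y][x] = value
--     return img
-- ===== Notes on version B (the rewrite author's own statement) =====
-- stated objective: alternative
-- what changed: A runs two separate passes (a row pass writing the first/last column, then a column pass overwriting row 0 and the last row); B is one nested scan over the grid that writes a cell exactly when it lies on the boundary.
import Mathlib
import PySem

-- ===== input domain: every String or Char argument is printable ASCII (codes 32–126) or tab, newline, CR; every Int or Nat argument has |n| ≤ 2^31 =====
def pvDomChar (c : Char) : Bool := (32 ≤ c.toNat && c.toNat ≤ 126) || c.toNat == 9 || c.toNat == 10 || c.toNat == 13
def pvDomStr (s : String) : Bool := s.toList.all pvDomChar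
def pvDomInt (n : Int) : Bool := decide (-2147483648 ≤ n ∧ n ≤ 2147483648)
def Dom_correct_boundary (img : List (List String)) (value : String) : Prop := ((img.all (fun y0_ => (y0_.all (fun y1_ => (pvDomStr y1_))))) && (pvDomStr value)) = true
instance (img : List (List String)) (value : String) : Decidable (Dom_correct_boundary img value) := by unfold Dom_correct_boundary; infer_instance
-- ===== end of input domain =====

-- B replaces A's two separate boundary passes by one nested boundary-condition scan over the grid;
-- the equivalence proved here is about the RETURN value (both Pythons also mutate img in place).

-- ===== PORT A =====
def correct_boundary (img : List (List String)) (value : String) : List (List String) :=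
  let size_y : Int := img.length
  let size_x : Int := (PySem.List.pyGetD img 0 []).length
  let img1 := (PySem.List.pyRange 0 size_y 1).foldl (fun im y =>
      let im := PySem.List.pySetD im y (PySem.List.pySetD (PySem.List.pyGetD im y []) 0 value)
      PySem.List.pySetD im y (PySem.List.pySetD (PySem.List.pyGetD im y []) (size_x - 1) value)) img
  (PySem.List.pyRange 0 size_x 1).foldl (fun im x =>
      let im := PySem.List.pySetD im 0 (PySem.List.pySetD (PySem.List.pyGetD im 0 []) x value)
      PySem.List.pySetD im (size_y - 1) (PySem.List.pySetD (PySem.List.pyGetD im (size_y - 1) []) x value)) img1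

-- ===== PORT B =====
def correct_boundary_alt (img : List (List String)) (value : String) : List (List String) :=
  let size_y : Int := img.length
  let size_x : Int := (PySem.List.pyGetD img 0 []).length
  (PySem.List.pyRange 0 size_y 1).foldl (fun im y =>
    (PySem.List.pyRange 0 size_x 1).foldl (fun im x =>
      if y = 0 ∨ y = size_y - 1 ∨ x = 0 ∨ x = size_x - 1 then
        PySem.List.pySetD im y (PySem.List.pySetD (PySem.List.pyGetD im y []) x value)
      else im) im) img

-- ===== PRECONDITION & SPEC =====
-- Pre_ excludes exactly the inputs on which A raises IndexError: an empty img, an empty first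
-- row (img[0][0] fails), or a row shorter than len(img[0]) (img[y][size_x-1] or img[-1][x] fails).
def Pre_correct_boundary (img : List (List String)) (value : String) : Prop :=
  0 < img.length ∧ 0 < (img.headD []).length ∧ ∀ row ∈ img, (img.headD []).length ≤ row.length
instance (img : List (List String)) (value : String) : Decidable (Pre_correct_boundary img value) := by unfold Pre_correct_boundary; infer_instance
def pvWitness_correct_boundary : List (List String) × String := ([["a", "b"], ["c", "d"]], "#")

def Spec_correct_boundary (img : List (List String)) (value : String) (out : List (List String)) : Prop := out = correct_boundary_alt img value
instance (img : List (List String)) (value : String) (out : List (List String)) : Decidable (Spec_correct_boundary img value out) := by unfold Spec_correct_boundary; infer_instance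

-- ===== CLAIM (what is proved, stated in full; the proofs are below) =====
def Claim_equal_correct_boundary : Prop := ∀ (img : List (List String)) (value : String), Dom_correct_boundary img value → Pre_correct_boundary img value → Spec_correct_boundary img value (correct_boundary img value)
-- ===== LEMMAS AND PROOFS =====

-- Proof-side helpers: the common normal form of both programs.
def pvFill (m : Nat) (v : String) (r : List String) : List String :=
  List.replicate m v ++ r.drop m
def pvEdge (m : Nat) (v : String) (r : List String) : List String :=
  (r.set 0 v).set (m - 1) v
def pvNorm (img : List (List String)) (v : String) : List (List String) :=
  img.mapIdx (fun y row =>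
    if y = 0 ∨ y = img.length - 1 then pvFill (img.headD []).length v row
    else pvEdge (img.headD []).length v row)

-- A fold over range(len(state)) whose step rewrites exactly row y is a mapIdx.
lemma pv_loop_rows (P : List String → Prop) (F : Nat → List String → List String)
    (g : List (List String) → Int → List (List String))
    (hg : ∀ im (k : Nat), k < im.length → P (im.getD k []) →
      g im (k : Int) = PySem.List.pySetD im (k : Int) (F k (PySem.List.pyGetD im (k : Int) []))) :
    ∀ (suf pre : List (List String)), (∀ row ∈ suf, P row) →
      (PySem.List.pyRange (pre.length : Int) ((pre.length : Int) + (suf.length : Int)) 1).foldl g (pre ++ suf)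
        = pre ++ suf.mapIdx (fun i row => F (pre.length + i) row) := by
  intro suf
  induction suf with
  | nil => intro pre _; simp [PySem.List.pyRange_one_eq_nil]
  | cons x suf ih =>
    intro pre hP
    have hlt : (pre.length : Int) < (pre.length : Int) + ((x :: suf).length : Int) := by
      simp only [List.length_cons]; omega
    rw [PySem.List.pyRange_one_cons hlt, List.foldl_cons]
    have hglen : pre.length < (pre ++ x :: suf).length := by simp
    have hgetD : (pre ++ x :: suf).getD pre.length [] = x := by
      simp [List.getD_eq_getElem?_getD, List.getElem?_append_right]
    have hget : PySem.List.pyGetD (pre ++ x :: suf) (pre.length : Int) [] = x := by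
      rw [PySem.List.pyGetD_natCast, hgetD]
    rw [hg _ _ hglen (by rw [hgetD]; exact hP x (by simp)), hget, PySem.List.pySetD_natCast]
    have hset : (pre ++ x :: suf).set pre.length (F pre.length x)
        = (pre ++ [F pre.length x]) ++ suf := by
      rw [List.set_append]
      simp
    rw [hset]
    have hrec := ih (pre ++ [F pre.length x]) (fun r hr => hP r (by simp [hr]))
    have hrange : PySem.List.pyRange ((pre.length : Int) + 1) ((pre.length : Int) + ((x :: suf).length : Int)) 1
        = PySem.List.pyRange (((pre ++ [F pre.length x]).length : Int)) (((pre ++ [F pre.length x]).length : Int) + (suf.length : Int)) 1 := by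
      congr 1 <;> simp <;> ring
    rw [hrange, hrec, List.mapIdx_cons]
    have hfun : (fun i row => F ((pre ++ [F pre.length x]).length + i) row)
        = (fun i row => F (pre.length + (i + 1)) row) := by
      funext i row
      congr 1
      simp
      omega
    rw [hfun]
    simp

-- A fold over range(m) setting column x of a row to v fills the first m cells.
lemma pv_loop_fill (v : String) (g : List String → Int → List String) :
    ∀ (m : Nat), (∀ r (k : Nat), k < m → g r (k : Int) = PySem.List.pySetD r (k : Int) v) →
      ∀ (r : List String), m ≤ r.length →
        (PySem.List.pyRange 0 (m : Int) 1).foldl g r = pvFill m v r := by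
  intro m
  induction m with
  | zero => intro _ r _; simp [PySem.List.pyRange_one_eq_nil, pvFill]
  | succ m ih =>
    intro hg r hr
    have hcast : ((m + 1 : Nat) : Int) = (m : Int) + 1 := by push_cast; ring
    rw [hcast, PySem.List.pyRange_one_succ_right (by positivity), List.foldl_append, List.foldl_cons,
      List.foldl_nil]
    have hmid := ih (fun r k hk => hg r k (by omega)) r (by omega)
    rw [hmid, hg _ m (by omega), PySem.List.pySetD_natCast]
    unfold pvFill
    have hlen : m < (List.replicate m v ++ r.drop m).length := by
      simp
      omega
    rw [List.set_append]
    have : ¬ m < (List.replicate m v).length := by simp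
    rw [if_neg this]
    have hdrop : r.drop m = r[m] :: r.drop (m + 1) := (List.getElem_cons_drop (by omega)).symm
    simp only [List.length_replicate, Nat.sub_self]
    rw [hdrop, List.set_cons_zero, List.replicate_succ', List.append_assoc, List.singleton_append]

-- A fold over range(m) whose step acts only at columns 0 and m-1 is pvEdge.
lemma pv_loop_edge (v : String) (m : Nat) (hm : 0 < m)
    (g : List String → Int → List String)
    (hg1 : ∀ r (k : Nat), k < m → (k = 0 ∨ k = m - 1) → g r (k : Int) = PySem.List.pySetD r (k : Int) v)
    (hg2 : ∀ r (k : Nat), k < m → ¬(k = 0 ∨ k = m - 1) → g r (k : Int) = r) :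
    ∀ r, (PySem.List.pyRange 0 (m : Int) 1).foldl g r = pvEdge m v r := by
  intro r
  rcases Nat.eq_or_lt_of_le hm with h1 | h2
  · -- m = 1
    have hm1 : m = 1 := h1.symm
    subst hm1
    have : PySem.List.pyRange 0 ((1 : Nat) : Int) 1 = [0] := by decide
    rw [this, List.foldl_cons, List.foldl_nil]
    have h00 := hg1 r 0 (by omega) (by omega)
    simp only [Nat.cast_zero] at h00
    rw [h00, show PySem.List.pySetD r (0 : Int) v = r.set 0 v from by
      rw [show (0 : Int) = ((0 : Nat) : Int) by simp, PySem.List.pySetD_natCast]]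
    unfold pvEdge
    simp [List.set_set]
  · -- 2 ≤ m
    have hsplit : PySem.List.pyRange 0 (m : Int) 1
        = 0 :: (PySem.List.pyRange 1 ((m : Int) - 1) 1 ++ [(m : Int) - 1]) := by
      have ha : PySem.List.pyRange 0 (m : Int) 1 = 0 :: PySem.List.pyRange 1 (m : Int) 1 := by
        rw [PySem.List.pyRange_one_cons (by omega)]
        norm_num
      have hb : PySem.List.pyRange 1 (m : Int) 1
          = PySem.List.pyRange 1 ((m : Int) - 1) 1 ++ [(m : Int) - 1] := by
        have hc : (m : Int) = ((m : Int) - 1) + 1 := by ring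
        rw [hc, PySem.List.pyRange_one_succ_right (by omega)]
        norm_num
      rw [ha, hb]
    rw [hsplit, List.foldl_cons, List.foldl_append, List.foldl_cons, List.foldl_nil]
    have h0 := hg1 r 0 (by omega) (by omega)
    simp only [Nat.cast_zero] at h0
    rw [h0, show PySem.List.pySetD r (0 : Int) v = r.set 0 v from by
      rw [show (0 : Int) = ((0 : Nat) : Int) by simp, PySem.List.pySetD_natCast]]
    have hmid : ∀ (xs : List Int), (∀ x ∈ xs, 1 ≤ x ∧ x < (m : Int) - 1) →
        ∀ s, xs.foldl g s = s := by
      intro xs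
      induction xs with
      | nil => intro _ s; simp
      | cons x xs ihx =>
        intro hx s
        rw [List.foldl_cons]
        obtain ⟨hx1, hx2⟩ := hx x (by simp)
        have hxk : x = ((x.toNat : Nat) : Int) := by omega
        rw [hxk, hg2 s x.toNat (by omega) (by omega)]
        exact ihx (fun y hy => hx y (by simp [hy])) s
    rw [hmid _ (fun x hx => by
      rw [PySem.List.mem_pyRange_one] at hx
      exact ⟨hx.1, hx.2⟩) _]
    have hlast : ((m : Int) - 1) = ((m - 1 : Nat) : Int) := by omega
    rw [hlast]
    rw [hg1 _ (m - 1) (by omega) (by omega)]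
    rw [PySem.List.pySetD_natCast]
    rfl

-- An image-level fold whose step rewrites only row j is row j's fold.
lemma pv_foldl_setrow (j : Nat) (F : List String → Int → List String)
    (h : List (List String) → Int → List (List String))
    (hh : ∀ im x, j < im.length →
      h im x = PySem.List.pySetD im (j : Int) (F (PySem.List.pyGetD im (j : Int) []) x)) :
    ∀ (xs : List Int) (im : List (List String)), j < im.length →
      xs.foldl h im = PySem.List.pySetD im (j : Int) (xs.foldl F (PySem.List.pyGetD im (j : Int) [])) := by
  intro xs
  induction xs with
  | nil =>
    intro im hj
    rw [List.foldl_nil, List.foldl_nil, PySem.List.pySetD_natCast, PySem.List.pyGetD_natCast,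
      List.getD_eq_getElem?_getD, List.getElem?_eq_getElem hj]
    simp [List.set_getElem_self]
  | cons x xs ihx =>
    intro im hj
    rw [List.foldl_cons, List.foldl_cons, hh im x hj]
    have hlen : j < (PySem.List.pySetD im (j : Int) (F (PySem.List.pyGetD im (j : Int) []) x)).length := by
      rw [PySem.List.length_pySetD]; exact hj
    rw [ihx _ hlen, PySem.List.pyGetD_pySetD_natCast _ _ _ _ _ hj, if_pos rfl]
    rw [PySem.List.pySetD_natCast, PySem.List.pySetD_natCast, PySem.List.pySetD_natCast, List.set_set]

-- An image-level fold whose step rewrites rows j1 then j2 (j1 ≠ j2) is the two row folds.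
lemma pv_foldl_setrow2 (j1 j2 : Nat) (hne : j1 ≠ j2) (F1 F2 : List String → Int → List String)
    (h : List (List String) → Int → List (List String))
    (hh : ∀ im x, j1 < im.length → j2 < im.length →
      h im x = PySem.List.pySetD (PySem.List.pySetD im (j1 : Int) (F1 (PySem.List.pyGetD im (j1 : Int) []) x)) (j2 : Int)
        (F2 (PySem.List.pyGetD im (j2 : Int) []) x)) :
    ∀ (xs : List Int) (im : List (List String)), j1 < im.length → j2 < im.length →
      xs.foldl h im = PySem.List.pySetD (PySem.List.pySetD im (j1 : Int) (xs.foldl F1 (PySem.List.pyGetD im (j1 : Int) []))) (j2 : Int)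
        (xs.foldl F2 (PySem.List.pyGetD im (j2 : Int) [])) := by
  intro xs
  induction xs with
  | nil =>
    intro im hj1 hj2
    simp only [List.foldl_nil]
    rw [PySem.List.pySetD_natCast, PySem.List.pySetD_natCast, PySem.List.pyGetD_natCast,
      PySem.List.pyGetD_natCast, List.getD_eq_getElem?_getD, List.getD_eq_getElem?_getD,
      List.getElem?_eq_getElem hj1, List.getElem?_eq_getElem hj2]
    simp [List.set_getElem_self]
  | cons x xs ihx =>
    intro im hj1 hj2
    rw [List.foldl_cons, List.foldl_cons, List.foldl_cons, hh im x hj1 hj2]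
    set a := F1 (PySem.List.pyGetD im (j1 : Int) []) x with ha
    set b := F2 (PySem.List.pyGetD im (j2 : Int) []) x with hb
    have hl1 : j1 < (PySem.List.pySetD (PySem.List.pySetD im (j1 : Int) a) (j2 : Int) b).length := by
      rw [PySem.List.length_pySetD, PySem.List.length_pySetD]; exact hj1
    have hl2 : j2 < (PySem.List.pySetD (PySem.List.pySetD im (j1 : Int) a) (j2 : Int) b).length := by
      rw [PySem.List.length_pySetD, PySem.List.length_pySetD]; exact hj2
    rw [ihx _ hl1 hl2]
    have hg1 : PySem.List.pyGetD (PySem.List.pySetD (PySem.List.pySetD im (j1 : Int) a) (j2 : Int) b) (j1 : Int) [] = a := by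
      rw [PySem.List.pyGetD_pySetD_natCast _ _ _ _ _ (by rw [PySem.List.length_pySetD]; exact hj2),
        if_neg hne, PySem.List.pyGetD_pySetD_natCast _ _ _ _ _ hj1, if_pos rfl]
    have hg2 : PySem.List.pyGetD (PySem.List.pySetD (PySem.List.pySetD im (j1 : Int) a) (j2 : Int) b) (j2 : Int) [] = b := by
      rw [PySem.List.pyGetD_pySetD_natCast _ _ _ _ _ (by rw [PySem.List.length_pySetD]; exact hj2),
        if_pos rfl]
    rw [hg1, hg2]
    simp only [PySem.List.pySetD_natCast]
    rw [List.set_comm _ _ (fun h : j2 = j1 => hne h.symm), List.set_set, List.set_set]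

lemma pv_fill_edge (m : Nat) (hm : 0 < m) (v : String) (r : List String) :
    pvFill m v (pvEdge m v r) = pvFill m v r := by
  unfold pvFill pvEdge
  rw [List.drop_set, if_pos (by omega), List.drop_set, if_pos hm]

-- the assembled A-side result is pvNorm
lemma pv_assemble (img : List (List String)) (v : String) (h : 0 < img.length) :
    (((img.mapIdx fun _ r => pvEdge (img.headD []).length v r).set 0
        (pvFill (img.headD []).length v (img[0]'h))).set (img.length - 1)
        (pvFill (img.headD []).length v (img[img.length - 1]'(by omega)))) = pvNorm img v := by
  apply List.ext_getElem
  · simp [pvNorm]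
  · intro i h1 h2
    have hi : i < img.length := by simpa [pvNorm] using h2
    simp only [pvNorm, List.getElem_set, List.getElem_mapIdx]
    by_cases hL : img.length - 1 = i
    · rw [if_pos hL, if_pos (by omega)]
      subst hL
      rfl
    · rw [if_neg hL]
      by_cases h0 : (0 : Nat) = i
      · rw [if_pos h0, if_pos (by omega)]
        subst h0
        rfl
      · rw [if_neg h0, if_neg (by omega)]

lemma pv_headD_getElem (img : List (List String)) (h : 0 < img.length) :
    img.headD [] = img[0]'h := by
  cases img with
  | nil => simp at h
  | cons a l => rfl

-- A computes pvNorm.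
lemma pv_getD0 (img : List (List String)) (h : 0 < img.length) :
    PySem.List.pyGetD img 0 [] = img.headD [] := by
  rw [show (0 : Int) = ((0 : Nat) : Int) by simp, PySem.List.pyGetD_natCast,
    List.getD_eq_getElem?_getD, List.getElem?_eq_getElem h, pv_headD_getElem img h]
  rfl

lemma pv_A_char (img : List (List String)) (v : String) (hpre : Pre_correct_boundary img v) :
    correct_boundary img v = pvNorm img v := by
  obtain ⟨hn, hm, hrows⟩ := hpre
  unfold correct_boundary
  simp only
  rw [pv_getD0 img hn]
  have hloop1 : List.foldl
      (fun im y =>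
        PySem.List.pySetD (PySem.List.pySetD im y (PySem.List.pySetD (PySem.List.pyGetD im y []) 0 v)) y
          (PySem.List.pySetD
            (PySem.List.pyGetD (PySem.List.pySetD im y (PySem.List.pySetD (PySem.List.pyGetD im y []) 0 v)) y [])
            ((((img.headD []).length : Int)) - 1) v))
      img (PySem.List.pyRange 0 (img.length : Int) 1)
      = List.mapIdx (fun _ r => pvEdge (img.headD []).length v r) img := by
    have h := pv_loop_rows (fun _ => True) (fun _ r => pvEdge (img.headD []).length v r)
      (fun im y =>
        PySem.List.pySetD (PySem.List.pySetD im y (PySem.List.pySetD (PySem.List.pyGetD im y []) 0 v)) y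
          (PySem.List.pySetD
            (PySem.List.pyGetD (PySem.List.pySetD im y (PySem.List.pySetD (PySem.List.pyGetD im y []) 0 v)) y [])
            ((((img.headD []).length : Int)) - 1) v))
      (by
        intro im k hk _
        beta_reduce
        rw [PySem.List.pyGetD_pySetD_natCast _ _ _ _ _ hk, if_pos rfl]
        simp only [PySem.List.pySetD_natCast]
        rw [List.set_set]
        rw [show ((((img.headD []).length : Int)) - 1) = ((((img.headD []).length - 1) : Nat) : Int) by omega,
          PySem.List.pySetD_natCast]
        rw [show (0 : Int) = ((0 : Nat) : Int) by simp, PySem.List.pySetD_natCast]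
        simp [pvEdge])
      img [] (fun _ _ => trivial)
    simpa using h
  rw [hloop1]
  set img1 := List.mapIdx (fun _ r => pvEdge (img.headD []).length v r) img with himg1
  have hlen1 : img1.length = img.length := by rw [himg1]; simp
  have hget1 : ∀ (k : Nat) (hk : k < img.length),
      PySem.List.pyGetD img1 (k : Int) [] = pvEdge (img.headD []).length v (img[k]'hk) := by
    intro k hk
    rw [PySem.List.pyGetD_natCast, List.getD_eq_getElem?_getD,
      List.getElem?_eq_getElem (by rw [hlen1]; exact hk)]
    simp [himg1]
  have hedge_len : ∀ (k : Nat) (hk : k < img.length),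
      (img.headD []).length ≤ (pvEdge (img.headD []).length v (img[k]'hk)).length := by
    intro k hk
    unfold pvEdge
    simp only [List.length_set]
    exact hrows _ (List.getElem_mem hk)
  have hfill : ∀ (k : Nat) (hk : k < img.length),
      List.foldl (fun r x => PySem.List.pySetD r x v)
        (pvEdge (img.headD []).length v (img[k]'hk))
        (PySem.List.pyRange 0 ((img.headD []).length : Int) 1)
        = pvFill (img.headD []).length v (img[k]'hk) := by
    intro k hk
    rw [pv_loop_fill v _ (img.headD []).length (fun r j hj => rfl) _ (hedge_len k hk),
      pv_fill_edge _ hm]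
  rcases Nat.lt_or_ge 1 img.length with h2 | h1
  · -- at least two rows: rows 0 and length-1 are distinct
    rw [show ((img.length : Int) - 1) = (((img.length - 1 : Nat)) : Int) by omega]
    have hstep := pv_foldl_setrow2 0 (img.length - 1) (by omega)
      (fun r x => PySem.List.pySetD r x v) (fun r x => PySem.List.pySetD r x v)
      (fun im x =>
        PySem.List.pySetD (PySem.List.pySetD im 0 (PySem.List.pySetD (PySem.List.pyGetD im 0 []) x v))
          (((img.length - 1 : Nat)) : Int)
          (PySem.List.pySetD
            (PySem.List.pyGetD (PySem.List.pySetD im 0 (PySem.List.pySetD (PySem.List.pyGetD im 0 []) x v))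
              (((img.length - 1 : Nat)) : Int) [])
            x v))
      (by
        intro im x hj1 hj2
        beta_reduce
        simp only [Nat.cast_zero]
        rw [show (0 : Int) = ((0 : Nat) : Int) by simp]
        rw [PySem.List.pyGetD_pySetD_natCast _ _ _ _ _ (by simpa using hj1), if_neg (by omega)])
      (PySem.List.pyRange 0 ((img.headD []).length : Int) 1) img1
      (by omega) (by omega)
    rw [hstep]
    rw [hget1 0 hn, hget1 (img.length - 1) (by omega), hfill 0 hn, hfill (img.length - 1) (by omega)]
    rw [PySem.List.pySetD_natCast, PySem.List.pySetD_natCast]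
    exact pv_assemble img v hn
  · -- a single row: both writes hit row 0
    have hn1 : img.length = 1 := by omega
    rw [show ((img.length : Int) - 1) = ((0 : Nat) : Int) by omega]
    simp only [Nat.cast_zero]
    have hstep := pv_foldl_setrow 0
      (fun r x => PySem.List.pySetD (PySem.List.pySetD r x v) x v)
      (fun im x =>
        PySem.List.pySetD (PySem.List.pySetD im 0 (PySem.List.pySetD (PySem.List.pyGetD im 0 []) x v)) 0
          (PySem.List.pySetD
            (PySem.List.pyGetD (PySem.List.pySetD im 0 (PySem.List.pySetD (PySem.List.pyGetD im 0 []) x v)) 0 [])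
            x v))
      (by
        intro im x hj
        beta_reduce
        rw [show (0 : Int) = ((0 : Nat) : Int) by simp]
        rw [PySem.List.pyGetD_pySetD_natCast _ _ _ _ _ (by simpa using hj), if_pos rfl]
        simp only [PySem.List.pySetD_natCast]
        rw [List.set_set])
      (PySem.List.pyRange 0 ((img.headD []).length : Int) 1) img1 (by omega)
    rw [hstep]
    rw [hget1 0 hn]
    have hfold2 : List.foldl (fun r x => PySem.List.pySetD (PySem.List.pySetD r x v) x v)
        (pvEdge (img.headD []).length v (img[0]'hn))
        (PySem.List.pyRange 0 ((img.headD []).length : Int) 1)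
        = pvFill (img.headD []).length v (img[0]'hn) := by
      rw [pv_loop_fill v _ (img.headD []).length (fun r j hj => by
          simp only [PySem.List.pySetD_natCast, List.set_set]) _ (hedge_len 0 hn),
        pv_fill_edge _ hm]
    rw [hfold2]
    rw [PySem.List.pySetD_natCast]
    rw [← pv_assemble img v hn]
    have h10 : img.length - 1 = 0 := by omega
    simp only [h10, List.set_set]
    rw [himg1]

lemma pv_B_char (img : List (List String)) (v : String) (hpre : Pre_correct_boundary img v) :
    correct_boundary_alt img v = pvNorm img v := by
  obtain ⟨hn, hm, hrows⟩ := hpre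
  unfold correct_boundary_alt
  simp only
  rw [pv_getD0 img hn]
  have hmain := pv_loop_rows (fun row => (img.headD []).length ≤ row.length)
    (fun k row => if k = 0 ∨ k = img.length - 1 then pvFill (img.headD []).length v row
      else pvEdge (img.headD []).length v row)
    (fun im y =>
      List.foldl (fun im x =>
        if y = 0 ∨ y = (img.length : Int) - 1 ∨ x = 0 ∨ x = ((img.headD []).length : Int) - 1 then
          PySem.List.pySetD im y (PySem.List.pySetD (PySem.List.pyGetD im y []) x v)
        else im) im (PySem.List.pyRange 0 ((img.headD []).length : Int) 1))
    (by
      intro im k hk hrow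
      beta_reduce
      have hrow' : (img.headD []).length ≤ (PySem.List.pyGetD im (k : Int) []).length := by
        rw [PySem.List.pyGetD_natCast]; exact hrow
      have hrowred := pv_foldl_setrow k
        (fun r x => if (k : Int) = 0 ∨ (k : Int) = (img.length : Int) - 1 ∨ x = 0 ∨ x = ((img.headD []).length : Int) - 1 then
            PySem.List.pySetD r x v else r)
        (fun im2 x => if (k : Int) = 0 ∨ (k : Int) = (img.length : Int) - 1 ∨ x = 0 ∨ x = ((img.headD []).length : Int) - 1 then
            PySem.List.pySetD im2 (k : Int) (PySem.List.pySetD (PySem.List.pyGetD im2 (k : Int) []) x v)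
          else im2)
        (by
          intro im2 x hj
          beta_reduce
          by_cases hc : (k : Int) = 0 ∨ (k : Int) = (img.length : Int) - 1 ∨ x = 0 ∨ x = ((img.headD []).length : Int) - 1
          · rw [if_pos hc, if_pos hc]
          · rw [if_neg hc, if_neg hc, PySem.List.pySetD_natCast, PySem.List.pyGetD_natCast,
              List.getD_eq_getElem?_getD, List.getElem?_eq_getElem hj]
            simp [List.set_getElem_self])
        (PySem.List.pyRange 0 ((img.headD []).length : Int) 1) im hk
      rw [hrowred]
      congr 1
      by_cases hb : k = 0 ∨ k = img.length - 1
      · rw [if_pos hb]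
        have hfn : (fun (r : List String) (x : Int) =>
            if (k : Int) = 0 ∨ (k : Int) = (img.length : Int) - 1 ∨ x = 0 ∨ x = ((img.headD []).length : Int) - 1 then
              PySem.List.pySetD r x v else r) = (fun r x => PySem.List.pySetD r x v) := by
          funext r x
          apply if_pos
          rcases hb with hb | hb
          · left; omega
          · right; left; omega
        rw [hfn]
        exact pv_loop_fill v _ (img.headD []).length (fun r j hj => rfl) _ hrow'
      · rw [if_neg hb]
        apply pv_loop_edge v (img.headD []).length hm
        · intro r j hj hj2
          apply if_pos
          rcases hj2 with hj2 | hj2 <;> subst hj2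
          · right; right; left; simp
          · right; right; right; omega
        · intro r j hj hj2
          apply if_neg
          push Not
          push Not at hb hj2
          refine ⟨by omega, by omega, by omega, by omega⟩)
    img [] hrows
  simpa [pvNorm] using hmain

-- ===== VERDICT (by name: the statement is the Claim_ definition above) =====
theorem correct_boundary_spec : Claim_equal_correct_boundary := by
  intro img value _ hpre
  unfold Spec_correct_boundary
  rw [pv_A_char img value hpre, pv_B_char img value hpre]
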